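-- pv_equiv track=rewrite | github.com/linyc74/somatic_pipeline | somatic_pipeline/trimming.py | get_fastq_ext
-- ===== SOURCE A (Python) =====
-- def get_fastq_ext(fq: str) -> str:
--     for suffix in [
--         '.fq',
--         '.fq.gz',
--         '.fastq',
--         '.fastq.gz',
--     ]:
--         if fq.endswith(suffix):
--             return suffix
--     return ''
-- ===== SOURCE B (Python) =====
-- def get_fastq_ext(fq: str) -> str:
--     if fq.endswith('.gz'):
--         body, gz = fq[:-3], '.gz'
--     else:
--         body, gz = fq, ''
--     for s in ['.fq', '.fastq']:
--         if body.endswith(s):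
--             return s + gz
--     return ''
-- ===== Notes on version B (the rewrite author's own statement) =====
-- stated objective: simpler
-- what changed: A scans a flat list of four full suffixes; B first splits off the gzip compression tail and then matches only the two base extensions against the remaining body, reassembling the result.
import Mathlib
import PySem

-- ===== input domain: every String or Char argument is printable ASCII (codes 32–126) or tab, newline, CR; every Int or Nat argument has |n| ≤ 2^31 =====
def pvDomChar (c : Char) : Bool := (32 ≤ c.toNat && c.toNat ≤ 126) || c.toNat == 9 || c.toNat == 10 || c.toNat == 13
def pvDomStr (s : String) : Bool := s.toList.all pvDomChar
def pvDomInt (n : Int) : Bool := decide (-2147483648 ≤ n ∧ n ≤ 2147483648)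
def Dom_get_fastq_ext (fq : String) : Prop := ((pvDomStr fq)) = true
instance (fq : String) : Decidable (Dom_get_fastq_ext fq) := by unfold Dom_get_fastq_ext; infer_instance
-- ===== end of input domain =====

-- B splits off the '.gz' compression tail first and matches only the two base
-- extensions against the remaining body, instead of A's flat scan over the four
-- full suffixes; same cost, simpler decomposition.

-- ===== PORT A =====
-- A: loop over the four suffixes, return the first one fq ends with, else ''.
def get_fastq_ext (fq : String) : String :=
  match [".fq", ".fq.gz", ".fastq", ".fastq.gz"].find?
      (fun suffix => PySem.Str.endswith fq suffix) with
  | some s => s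
  | none => ""

-- ===== PORT B =====
-- B: split off the '.gz' tail (body = fq[:-3]), then match the two base extensions.
def get_fastq_ext_alt (fq : String) : String :=
  let bg : String × String :=
    if PySem.Str.endswith fq ".gz" then (PySem.Str.slice fq none (some (-3)), ".gz")
    else (fq, "")
  match [".fq", ".fastq"].find? (fun s => PySem.Str.endswith bg.1 s) with
  | some s => s ++ bg.2
  | none => ""

-- ===== PRECONDITION & SPEC =====
def Spec_get_fastq_ext (fq : String) (out : String) : Prop := out = get_fastq_ext_alt fq
instance (fq : String) (out : String) : Decidable (Spec_get_fastq_ext fq out) := by unfold Spec_get_fastq_ext; infer_instance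

-- ===== CLAIM (what is proved, stated in full; the proofs are below) =====
def Claim_equal_get_fastq_ext : Prop := ∀ (fq : String), Dom_get_fastq_ext fq → Spec_get_fastq_ext fq (get_fastq_ext fq)

-- ===== LEMMAS AND PROOFS =====

theorem ew_iff (s p : String) : PySem.Str.endswith s p = true ↔ p.toList <:+ s.toList := by
  simp [PySem.Chars.endswith_iff]

theorem slice3_toList (s : String) :
    (PySem.Str.slice s none (some (-3))).toList = s.toList.take (s.toList.length - 3) := by
  have h := PySem.List.slice_to_neg_ofNat s.toList 3 (by omega)
  simp [h]

theorem suffix_append_iff (a b t : List Char) : (a ++ b) <:+ (t ++ b) ↔ a <:+ t := by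
  constructor
  · rintro ⟨u, hu⟩
    rw [← List.append_assoc] at hu
    exact ⟨u, List.append_cancel_right hu⟩
  · rintro ⟨u, hu⟩
    exact ⟨u, by rw [← hu, List.append_assoc]⟩

theorem not_fq_of_gz (fq : String) (h : PySem.Str.endswith fq ".gz" = true) :
    PySem.Str.endswith fq ".fq" = false := by
  by_contra hc
  have hq : (".fq" : String).toList <:+ fq.toList :=
    (ew_iff fq ".fq").1 (by revert hc; cases PySem.Str.endswith fq ".fq" <;> simp)
  have hz : (".gz" : String).toList <:+ fq.toList := (ew_iff fq ".gz").1 h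
  rcases List.suffix_or_suffix_of_suffix hq hz with h' | h' <;> exact absurd h' (by decide)

theorem not_fastq_of_gz (fq : String) (h : PySem.Str.endswith fq ".gz" = true) :
    PySem.Str.endswith fq ".fastq" = false := by
  by_contra hc
  have hq : (".fastq" : String).toList <:+ fq.toList :=
    (ew_iff fq ".fastq").1 (by revert hc; cases PySem.Str.endswith fq ".fastq" <;> simp)
  have hz : (".gz" : String).toList <:+ fq.toList := (ew_iff fq ".gz").1 h
  rcases List.suffix_or_suffix_of_suffix hq hz with h' | h' <;> exact absurd h' (by decide)

theorem not_gz_of_not_gz (fq : String) (base : String)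
    (h : PySem.Str.endswith fq ".gz" = false)
    (hb : (".gz" : String).toList <:+ (base : String).toList) :
    PySem.Str.endswith fq base = false := by
  by_contra hc
  have hbs : base.toList <:+ fq.toList :=
    (ew_iff fq base).1 (by revert hc; cases PySem.Str.endswith fq base <;> simp)
  have h2 : PySem.Str.endswith fq ".gz" = true := (ew_iff fq ".gz").2 (hb.trans hbs)
  simp_all

theorem gz_split (fq : String) (base : String)
    (h : PySem.Str.endswith fq ".gz" = true)
    (hb : base.toList ++ (".gz" : String).toList = (base ++ ".gz").toList) :
    PySem.Str.endswith fq (base ++ ".gz") =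
      PySem.Str.endswith (PySem.Str.slice fq none (some (-3))) base := by
  obtain ⟨t, ht⟩ := (ew_iff fq ".gz").1 h
  have hlen : fq.toList.length = t.length + 3 := by
    rw [← ht]; simp
  have htake : fq.toList.take (fq.toList.length - 3) = t := by
    rw [hlen, Nat.add_sub_cancel, ← ht]
    exact List.take_left
  rw [Bool.eq_iff_iff, ew_iff, ew_iff, slice3_toList, htake, ← hb, ← ht]
  exact suffix_append_iff _ _ _

-- ===== VERDICT (by name: the statement is the Claim_ definition above) =====
theorem get_fastq_ext_spec : Claim_equal_get_fastq_ext := by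
  intro fq _
  unfold Spec_get_fastq_ext get_fastq_ext get_fastq_ext_alt
  by_cases hgz : PySem.Str.endswith fq ".gz" = true
  · have h1 := gz_split fq ".fq" hgz (by decide)
    have h2 := gz_split fq ".fastq" hgz (by decide)
    have hfq := not_fq_of_gz fq hgz
    have hfastq := not_fastq_of_gz fq hgz
    simp only [List.find?, hgz, if_true]
    rw [hfq]
    have e1 : PySem.Str.endswith fq ".fq.gz" =
        PySem.Str.endswith (PySem.Str.slice fq none (some (-3))) ".fq" := h1
    have e2 : PySem.Str.endswith fq ".fastq.gz" =
        PySem.Str.endswith (PySem.Str.slice fq none (some (-3))) ".fastq" := h2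
    rw [e1, e2, hfastq]
    cases PySem.Str.endswith (PySem.Str.slice fq none (some (-3))) ".fq" <;>
      cases PySem.Str.endswith (PySem.Str.slice fq none (some (-3))) ".fastq" <;> rfl
  · have hgz' : PySem.Str.endswith fq ".gz" = false := by
      revert hgz; cases PySem.Str.endswith fq ".gz" <;> simp
    have h1 := not_gz_of_not_gz fq ".fq.gz" hgz' (by decide)
    have h2 := not_gz_of_not_gz fq ".fastq.gz" hgz' (by decide)
    simp only [List.find?, hgz', if_false, Bool.false_eq_true]
    rw [h1, h2]
    cases PySem.Str.endswith fq ".fq" <;> cases PySem.Str.endswith fq ".fastq" <;> rfl
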